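-- pv_equiv track=rewrite | github.com/morikouhei/programming_contest | atcoder/ahc/ahc027/na2.py | get_point_score
-- ===== SOURCE A (Python) =====
-- inf = 10**10
--
-- def get_point_score(vis_time,d,T):
--
--     if vis_time == []:
--         return inf
--
--     base = d*(T-vis_time[-1])
--     now = 0
--     score = 0
--     for t in vis_time:
--         dif = t - now
--         if dif >= 0:
--             score += (dif)*(2*base + (dif-1)*d) // 2
--         now = t + 1
--         base = d
--
--     dif = T-now
--     if dif >= 0:
--         score += (dif)*(2*base + (dif-1)*d) // 2
--
--     return score
-- ===== SOURCE B (Python) =====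
-- inf = 10**10
--
-- def get_point_score(vis_time, d, T):
--     # Stage 1: the clamped gap lengths (idle stretches), including the trailing one.
--     # Stage 2: score = first-gap base correction + d * (total idle time) + d * (sum of C(g,2)).
--     if not vis_time:
--         return inf
--
--     gaps = []
--     now = 0
--     for t in vis_time:
--         gaps.append(max(t - now, 0))
--         now = t + 1
--     gaps.append(max(T - now, 0))
--
--     linear = sum(gaps)
--     quad = sum(g * (g - 1) // 2 for g in gaps)
--     base0 = d * (T - vis_time[-1])
--     return (base0 - d) * gaps[0] + d * linear + d * quad
-- ===== Notes on version B (the rewrite author's own statement) =====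
-- stated objective: alternative
-- what changed: Instead of threading now/base/score and applying A's per-segment arithmetic-series formula with sign guards, B builds the list of clamped idle-gap lengths in one pass and then computes the score globally as (base0-d)*gaps[0] + d*sum(gaps) + d*sum(g*(g-1)//2), handling the special first base as a single correction term.
import Mathlib
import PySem

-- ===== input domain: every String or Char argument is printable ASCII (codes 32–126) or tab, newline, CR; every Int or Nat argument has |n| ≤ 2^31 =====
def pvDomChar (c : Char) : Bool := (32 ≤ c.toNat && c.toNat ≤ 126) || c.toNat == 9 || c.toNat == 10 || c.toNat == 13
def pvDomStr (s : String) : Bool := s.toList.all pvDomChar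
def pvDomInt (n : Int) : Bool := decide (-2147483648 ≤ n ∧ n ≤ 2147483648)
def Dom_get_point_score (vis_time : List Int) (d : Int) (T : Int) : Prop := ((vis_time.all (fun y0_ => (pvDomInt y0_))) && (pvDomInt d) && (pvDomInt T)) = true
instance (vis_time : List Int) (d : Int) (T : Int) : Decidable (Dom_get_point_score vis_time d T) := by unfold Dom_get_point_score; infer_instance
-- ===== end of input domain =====

-- B replaces A's stateful per-segment series formula (threading now/base/score with sign guards)
-- by two stages: build the clamped gap-length list, then one global algebraic formula over it.

-- ===== PORT A =====
def get_point_score (vis_time : List Int) (d : Int) (T : Int) : Int :=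
  if vis_time = [] then 10 ^ 10
  else
    -- vis_time[-1]: the branch guarantees the list is nonempty, so the IndexError case is dead
    let base := d * (T - (PySem.List.pyGet? vis_time (-1)).getD 0)
    let st := vis_time.foldl
      (fun (st : Int × Int × Int) t =>
        let dif := t - st.1
        ((t + 1 : Int), d,
          if 0 ≤ dif then st.2.2 + PySem.Int.floordiv (dif * (2 * st.2.1 + (dif - 1) * d)) 2
          else st.2.2))
      ((0 : Int), base, (0 : Int))
    let dif := T - st.1
    if 0 ≤ dif then st.2.2 + PySem.Int.floordiv (dif * (2 * st.2.1 + (dif - 1) * d)) 2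
    else st.2.2

-- ===== PORT B =====
def get_point_score_alt (vis_time : List Int) (d : Int) (T : Int) : Int :=
  if vis_time = [] then 10 ^ 10
  else
    let st := vis_time.foldl
      (fun (st : Int × List Int) t => ((t + 1 : Int), st.2 ++ [max (t - st.1) 0]))
      ((0 : Int), ([] : List Int))
    let gaps := st.2 ++ [max (T - st.1) 0]
    let linear := gaps.sum
    let quad := (gaps.map (fun g => PySem.Int.floordiv (g * (g - 1)) 2)).sum
    let base0 := d * (T - (PySem.List.pyGet? vis_time (-1)).getD 0)
    (base0 - d) * ((PySem.List.pyGet? gaps 0).getD 0) + d * linear + d * quad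

-- ===== PRECONDITION & SPEC =====
def Spec_get_point_score (vis_time : List Int) (d : Int) (T : Int) (out : Int) : Prop := out = get_point_score_alt vis_time d T
instance (vis_time : List Int) (d : Int) (T : Int) (out : Int) : Decidable (Spec_get_point_score vis_time d T out) := by unfold Spec_get_point_score; infer_instance

-- ===== CLAIM =====
def Claim_equal_get_point_score : Prop := ∀ (vis_time : List Int) (d : Int) (T : Int), Dom_get_point_score vis_time d T → Spec_get_point_score vis_time d T (get_point_score vis_time d T)

-- ===== LEMMAS AND PROOFS =====

-- A's loop body and trailing-gap step, named for the proofs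
def pvStepA (d : Int) (st : Int × Int × Int) (t : Int) : Int × Int × Int :=
  let dif := t - st.1
  ((t + 1 : Int), d,
    if 0 ≤ dif then st.2.2 + PySem.Int.floordiv (dif * (2 * st.2.1 + (dif - 1) * d)) 2
    else st.2.2)

def pvFinA (d T : Int) (st : Int × Int × Int) : Int :=
  let dif := T - st.1
  if 0 ≤ dif then st.2.2 + PySem.Int.floordiv (dif * (2 * st.2.1 + (dif - 1) * d)) 2
  else st.2.2

-- B's loop body
def pvStepB (st : Int × List Int) (t : Int) : Int × List Int :=
  ((t + 1 : Int), st.2 ++ [max (t - st.1) 0])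

-- g*(g-1)//2
def pvC (g : Int) : Int := PySem.Int.floordiv (g * (g - 1)) 2

-- the full list of clamped gaps (including the trailing one) when scanning l from time `now`
def pvGaps (T : Int) : List Int → Int → List Int
  | [], now => [max (T - now) 0]
  | t :: ls, now => max (t - now) 0 :: pvGaps T ls (t + 1)

lemma pvC_spec (dif : Int) : dif * (dif - 1) = 2 * pvC dif := by
  obtain ⟨m, hm⟩ := Int.even_mul_succ_self (dif - 1)
  have hd : dif * (dif - 1) = 2 * m := by linear_combination hm
  rw [pvC, hd, PySem.Int.floordiv_eq_ediv_of_pos (by norm_num : (0:Int) < 2),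
    Int.mul_ediv_cancel_left _ (by norm_num : (2:Int) ≠ 0)]

-- A's cost of one segment, as a function of the clamped gap
lemma pvCostA (d b dif : Int) :
    (if 0 ≤ dif then PySem.Int.floordiv (dif * (2 * b + (dif - 1) * d)) 2 else 0)
      = b * max dif 0 + d * pvC (max dif 0) := by
  by_cases h : 0 ≤ dif
  · rw [if_pos h, max_eq_left h]
    have h2 : dif * (2 * b + (dif - 1) * d) = 2 * (b * dif + d * pvC dif) := by
      linear_combination d * pvC_spec dif
    rw [h2, PySem.Int.floordiv_eq_ediv_of_pos (by norm_num : (0:Int) < 2),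
      Int.mul_ediv_cancel_left _ (by norm_num : (2:Int) ≠ 0)]
  · rw [if_neg h, max_eq_right (by omega : dif ≤ 0)]
    have : pvC 0 = 0 := by decide
    rw [this]
    ring

lemma pvIteAdd (c : Prop) [Decidable c] (s x : Int) :
    (if c then s + x else s) = s + (if c then x else 0) := by
  split_ifs <;> ring

-- A's loop from a state whose base is already d = the gap-cost sum over pvGaps
lemma pvLoopA (d T : Int) (l : List Int) : ∀ (now score : Int),
    pvFinA d T (l.foldl (pvStepA d) (now, d, score))
      = score + ((pvGaps T l now).map (fun g => d * g + d * pvC g)).sum := by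
  induction l with
  | nil =>
    intro now score
    simp only [List.foldl_nil, pvFinA, pvGaps, List.map_cons, List.map_nil, List.sum_cons,
      List.sum_nil, pvIteAdd, pvCostA d d (T - now)]
    ring
  | cons t ls ih =>
    intro now score
    have hs : pvStepA d (now, d, score) t
        = ((t + 1 : Int), d, score + (d * max (t - now) 0 + d * pvC (max (t - now) 0))) := by
      simp only [pvStepA, pvIteAdd, pvCostA d d (t - now)]
    rw [List.foldl_cons, hs, ih]
    simp only [pvGaps, List.map_cons, List.sum_cons]
    ring

-- B's gap-building fold produces exactly pvGaps
lemma pvLoopB (T : Int) (l : List Int) : ∀ (now : Int) (acc : List Int),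
    (l.foldl pvStepB (now, acc)).2 ++ [max (T - (l.foldl pvStepB (now, acc)).1) 0]
      = acc ++ pvGaps T l now := by
  induction l with
  | nil => intro now acc; simp [pvGaps]
  | cons t ls ih =>
    intro now acc
    rw [List.foldl_cons,
      show pvStepB (now, acc) t = ((t + 1 : Int), acc ++ [max (t - now) 0]) from rfl,
      ih (t + 1) (acc ++ [max (t - now) 0])]
    simp [pvGaps]

lemma pvSumSplit (d : Int) (l : List Int) :
    (l.map (fun g => d * g + d * pvC g)).sum = d * l.sum + d * (l.map pvC).sum := by
  induction l with
  | nil => simp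
  | cons g ls ih => simp only [List.map_cons, List.sum_cons, ih]; ring

theorem get_point_score_spec : Claim_equal_get_point_score := by
  intro vis_time d T _
  unfold Spec_get_point_score
  cases vis_time with
  | nil => rfl
  | cons t0 rest =>
    set B0 := d * (T - (PySem.List.pyGet? (t0 :: rest) (-1)).getD 0) with hB0
    -- A side
    have hhead : pvStepA d ((0 : Int), B0, (0 : Int)) t0
        = ((t0 + 1 : Int), d, B0 * max t0 0 + pvC (max t0 0) * d) := by
      simp only [pvStepA, pvIteAdd, pvCostA d B0 (t0 - 0)]
      norm_num
      ring
    have hA : pvFinA d T ((t0 :: rest).foldl (pvStepA d) ((0 : Int), B0, (0 : Int)))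
        = B0 * max t0 0 + pvC (max t0 0) * d
          + ((pvGaps T rest (t0 + 1)).map (fun g => d * g + d * pvC g)).sum := by
      rw [List.foldl_cons, hhead, pvLoopA]
    have hAval : get_point_score (t0 :: rest) d T
        = pvFinA d T ((t0 :: rest).foldl (pvStepA d) ((0 : Int), B0, (0 : Int))) := rfl
    -- B side
    have hBval : get_point_score_alt (t0 :: rest) d T
        = (B0 - d) * ((PySem.List.pyGet?
              (((t0 :: rest).foldl pvStepB ((0 : Int), ([] : List Int))).2
                ++ [max (T - ((t0 :: rest).foldl pvStepB ((0 : Int), ([] : List Int))).1) 0]) 0).getD 0)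
          + d * (((t0 :: rest).foldl pvStepB ((0 : Int), ([] : List Int))).2
                ++ [max (T - ((t0 :: rest).foldl pvStepB ((0 : Int), ([] : List Int))).1) 0]).sum
          + d * ((((t0 :: rest).foldl pvStepB ((0 : Int), ([] : List Int))).2
                ++ [max (T - ((t0 :: rest).foldl pvStepB ((0 : Int), ([] : List Int))).1) 0]).map pvC).sum := rfl
    have hBfold : ((t0 :: rest).foldl pvStepB ((0 : Int), ([] : List Int))).2
          ++ [max (T - ((t0 :: rest).foldl pvStepB ((0 : Int), ([] : List Int))).1) 0]
        = pvGaps T (t0 :: rest) 0 := by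
      rw [pvLoopB T (t0 :: rest) 0 []]
      rfl
    have hg : pvGaps T (t0 :: rest) 0 = max (t0 - 0) 0 :: pvGaps T rest (t0 + 1) := rfl
    have hget : (PySem.List.pyGet? (max (t0 - 0) 0 :: pvGaps T rest (t0 + 1)) 0).getD 0
        = max (t0 - 0) 0 := by
      simp [PySem.List.pyGet?, PySem.List.pyIdx?]
    rw [hAval, hA, hBval, hBfold, hg, hget]
    simp only [List.sum_cons, List.map_cons, List.sum_cons, pvSumSplit d, sub_zero]
    ring
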